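-- pv_equiv track=rewrite | github.com/tjrichmond907/HumanNavmesh | navmensh.py | getBorderEdges
-- ===== SOURCE A (Python) =====
-- import itertools
--
-- def getBorderEdges(faces):
--     edges = []
--     for item in faces:
--         possibleEdges = itertools.combinations(item, 2)
--         #temp = [i for i in possibleEdges if((i[0], i[1]) not in temp and (i[1], i[0]) not in temp)]
--         temp = []
--         for k in possibleEdges:
--             if((k[0], k[1]) not in temp and (k[1], k[0]) not in temp):
--                 temp.append(k)
--         for j in temp:
--             edges.append(j)
--     borders = []
--     for item in edges:
--         count = 0
--         for item2 in faces:
--             if(len(set(item).intersection(set(item2))) == 2):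
--                 count +=1
--         if(count == 1):
--             borders.append(item)
--     return borders
-- ===== SOURCE B (Python) =====
-- from itertools import combinations
--
-- def _key(u, v):
--     return (u, v) if u <= v else (v, u)
--
-- def getBorderEdges(faces):
--     # One pass: collect per-face deduped edges and count, per unordered pair,
--     # how many faces contain both endpoints; then filter edges with count 1.
--     edges = []
--     cnt = {}
--     for face in faces:
--         seen = set()
--         for u, v in combinations(face, 2):
--             key = _key(u, v)
--             if key in seen:
--                 continue
--             seen.add(key)
--             edges.append((u, v))
--             if u != v:
--                 cnt[key] = cnt.get(key, 0) + 1
--     return [e for e in edges if e[0] != e[1] and cnt.get(_key(e[0], e[1]), 0) == 1]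
-- ===== Notes on version B (the rewrite author's own statement) =====
-- stated objective: faster
-- what changed: Instead of re-scanning all faces with set intersections for every collected edge (quadratic in the number of faces), B makes one pass over the faces that both collects the per-face deduplicated edges and counts in a dictionary, per unordered vertex pair, how many faces contain both endpoints, then filters the edge list with one dictionary lookup per edge.
import Mathlib
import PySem

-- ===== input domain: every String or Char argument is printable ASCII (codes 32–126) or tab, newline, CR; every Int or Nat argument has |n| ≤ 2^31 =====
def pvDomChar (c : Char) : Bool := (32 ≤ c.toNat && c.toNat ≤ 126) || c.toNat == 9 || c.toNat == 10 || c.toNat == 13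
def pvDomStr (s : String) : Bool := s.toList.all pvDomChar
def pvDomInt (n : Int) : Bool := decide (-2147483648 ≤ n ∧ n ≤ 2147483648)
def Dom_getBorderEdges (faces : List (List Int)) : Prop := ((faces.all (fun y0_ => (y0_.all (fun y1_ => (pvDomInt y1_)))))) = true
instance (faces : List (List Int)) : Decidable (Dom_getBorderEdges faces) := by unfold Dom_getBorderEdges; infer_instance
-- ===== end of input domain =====

-- B replaces A's per-edge re-scan of all faces (with set intersections) by a single pass
-- that counts, per unordered vertex pair, how many faces contain both endpoints, then
-- filters the edge list by one dictionary lookup per edge; objective: faster.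

-- ===== PORT A =====
-- itertools.combinations(item, 2): ordered pairs (item[i], item[j]) with i < j, Python's order
def combos2 (l : List Int) : List (Int × Int) :=
  match l with
  | [] => []
  | x :: xs => xs.map (fun y => (x, y)) ++ combos2 xs

def getBorderEdges (faces : List (List Int)) : List (Int × Int) :=
  let edges := faces.foldl (fun edges item =>
    let temp := (combos2 item).foldl (fun temp k =>
      if !temp.contains (k.1, k.2) && !temp.contains (k.2, k.1) then temp ++ [k] else temp) []
    temp.foldl (fun edges j => edges ++ [j]) edges) []
  edges.foldl (fun borders item =>
    let count : Int := faces.foldl (fun count item2 =>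
      if PySem.Set.len (PySem.Set.inter (PySem.Set.ofList [item.1, item.2]) (PySem.Set.ofList item2)) = 2
      then count + 1 else count) 0
    if count = 1 then borders ++ [item] else borders) []

-- ===== PORT B =====
def sortKey (u v : Int) : Int × Int := if u ≤ v then (u, v) else (v, u)

def getBorderEdges_alt (faces : List (List Int)) : List (Int × Int) :=
  let st := faces.foldl (fun (st : List (Int × Int) × PySem.Dict (Int × Int) Int) face =>
    ((combos2 face).foldl
      (fun (st2 : PySem.Set (Int × Int) × List (Int × Int) × PySem.Dict (Int × Int) Int) k =>
        let key := sortKey k.1 k.2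
        if st2.1.contains key then st2
        else (st2.1.add key, st2.2.1 ++ [k],
              if k.1 ≠ k.2 then st2.2.2.insert key (st2.2.2.getD key 0 + 1) else st2.2.2))
      (PySem.Set.empty, st.1, st.2)).2) ([], PySem.Dict.empty)
  st.1.filter (fun e => e.1 != e.2 && (st.2.getD (sortKey e.1 e.2) 0 == 1))

-- ===== PRECONDITION & SPEC =====
def Spec_getBorderEdges (faces : List (List Int)) (out : List (Int × Int)) : Prop := out = getBorderEdges_alt faces
instance (faces : List (List Int)) (out : List (Int × Int)) : Decidable (Spec_getBorderEdges faces out) := by unfold Spec_getBorderEdges; infer_instance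

-- ===== CLAIM (what is proved, stated in full; the proofs are below) =====
def Claim_equal_getBorderEdges : Prop := ∀ (faces : List (List Int)), Dom_getBorderEdges faces → Spec_getBorderEdges faces (getBorderEdges faces)

-- ===== LEMMAS AND PROOFS =====

-- A's per-face dedup loop, as a structural recursion (temp = pairs already kept)
def dedup (temp : List (Int × Int)) : List (Int × Int) → List (Int × Int)
  | [] => []
  | k :: ps =>
    if k ∈ temp ∨ (k.2, k.1) ∈ temp then dedup temp ps
    else k :: dedup (temp ++ [k]) ps

-- predicate "k is a real edge carrying key"
def pk (key : Int × Int) : (Int × Int) → Bool := fun k => decide (k.1 ≠ k.2 ∧ sortKey k.1 k.2 = key)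

theorem key_eq_iff (k t : Int × Int) :
    sortKey t.1 t.2 = sortKey k.1 k.2 ↔ t = k ∨ t = (k.2, k.1) := by
  obtain ⟨a, b⟩ := t; obtain ⟨c, d⟩ := k
  simp only [sortKey, Prod.ext_iff]
  split_ifs <;> constructor <;> intro h <;> rcases h with h | h <;> simp_all <;> omega

theorem temp_loop_eq (ps : List (Int × Int)) : ∀ temp : List (Int × Int),
    ps.foldl (fun temp k =>
      if !temp.contains (k.1, k.2) && !temp.contains (k.2, k.1) then temp ++ [k] else temp) temp
    = temp ++ dedup temp ps := by
  induction ps with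
  | nil => intro temp; simp [dedup]
  | cons k ps ih =>
    intro temp
    simp only [List.foldl_cons]
    by_cases h : k ∈ temp ∨ (k.2, k.1) ∈ temp
    · have hstep : (if (!temp.contains (k.1, k.2) && !temp.contains (k.2, k.1)) = true
          then temp ++ [k] else temp) = temp := by
        rcases h with h | h <;> simp [List.contains_eq_mem, Prod.mk.eta, h]
      rw [hstep, ih temp, show dedup temp (k :: ps) = dedup temp ps from by simp [dedup, h]]
    · have hstep : (if (!temp.contains (k.1, k.2) && !temp.contains (k.2, k.1)) = true
          then temp ++ [k] else temp) = temp ++ [k] := by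
        rw [not_or] at h
        simp [List.contains_eq_mem, Prod.mk.eta, h.1, h.2]
      rw [hstep, ih (temp ++ [k]),
        show dedup temp (k :: ps) = k :: dedup (temp ++ [k]) ps from by simp [dedup, h]]
      simp

theorem foldl_snoc_eq_append (l : List (Int × Int)) : ∀ acc : List (Int × Int),
    l.foldl (fun a x => a ++ [x]) acc = acc ++ l := by
  induction l with
  | nil => simp
  | cons x xs ih => intro acc; simp [ih]

-- the edge list A builds (B builds the same list)
def edgesOf (faces : List (List Int)) : List (Int × Int) :=
  faces.flatMap (fun f => dedup [] (combos2 f))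

theorem edgesA (faces : List (List Int)) : ∀ acc : List (Int × Int),
    faces.foldl (fun edges item =>
      let temp := (combos2 item).foldl (fun temp k =>
        if !temp.contains (k.1, k.2) && !temp.contains (k.2, k.1) then temp ++ [k] else temp) []
      temp.foldl (fun edges j => edges ++ [j]) edges) acc
    = acc ++ edgesOf faces := by
  induction faces with
  | nil => intro acc; simp [edgesOf]
  | cons f fs ih =>
    intro acc
    simp only [List.foldl_cons]
    rw [show ((combos2 f).foldl (fun temp k =>
        if !temp.contains (k.1, k.2) && !temp.contains (k.2, k.1) then temp ++ [k] else temp) []) =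
        dedup [] (combos2 f) from by rw [temp_loop_eq]; simp]
    rw [foldl_snoc_eq_append, ih]
    simp [edgesOf]

-- members of combos2 are elements of the face
theorem combos2_mem {f : List Int} {k : Int × Int} (h : k ∈ combos2 f) : k.1 ∈ f ∧ k.2 ∈ f := by
  induction f with
  | nil => simp [combos2] at h
  | cons x xs ih =>
    simp only [combos2, List.mem_append, List.mem_map] at h
    rcases h with ⟨y, hy, rfl⟩ | h
    · exact ⟨by simp, by simp [hy]⟩
    · obtain ⟨h1, h2⟩ := ih h
      exact ⟨List.mem_cons_of_mem _ h1, List.mem_cons_of_mem _ h2⟩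

theorem combos2_exists {f : List Int} {key : Int × Int} (hlt : key.1 < key.2) :
    (∃ k ∈ combos2 f, sortKey k.1 k.2 = key) ↔ key.1 ∈ f ∧ key.2 ∈ f := by
  constructor
  · rintro ⟨k, hk, hkey⟩
    obtain ⟨h1, h2⟩ := combos2_mem hk
    have hko : sortKey (key.1, key.2).1 (key.1, key.2).2 = sortKey k.1 k.2 := by
      simp only [hkey]; simp [sortKey, le_of_lt hlt]
    rcases (key_eq_iff k (key.1, key.2)).mp hko with h | h
    · rw [← h] at h1 h2; simp at h1 h2; exact ⟨h1, h2⟩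
    · simp only [Prod.mk.injEq] at h
      exact ⟨h.1 ▸ h2, h.2 ▸ h1⟩
  · rintro ⟨h1, h2⟩
    induction f with
    | nil => simp at h1
    | cons x xs ih =>
      by_cases hx1 : key.1 = x
      · have h2' : key.2 ∈ xs := by
          rcases List.mem_cons.mp h2 with h | h
          · exfalso; omega
          · exact h
        refine ⟨(x, key.2), ?_, ?_⟩
        · simp [combos2, h2']
        · subst hx1; simp [sortKey, le_of_lt hlt]
      · by_cases hx2 : key.2 = x
        · have h1' : key.1 ∈ xs := by
            rcases List.mem_cons.mp h1 with h | h
            · exact absurd h hx1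
            · exact h
          refine ⟨(x, key.1), ?_, ?_⟩
          · simp [combos2, h1']
          · subst hx2; simp [sortKey, (show ¬ key.2 ≤ key.1 by omega)]
        · have h1' : key.1 ∈ xs := (List.mem_cons.mp h1).resolve_left hx1
          have h2' : key.2 ∈ xs := (List.mem_cons.mp h2).resolve_left hx2
          obtain ⟨k, hk, hkey⟩ := ih h1' h2'
          exact ⟨k, by simp [combos2, hk], hkey⟩

-- each unordered key occurs at most once in a deduped list; it occurs iff it occurs in ps
-- and is not already represented in temp
theorem dedup_key_count (ps : List (Int × Int)) : ∀ (temp : List (Int × Int)) (key : Int × Int),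
    (dedup temp ps).countP (fun k => decide (sortKey k.1 k.2 = key))
    = if (∃ k ∈ ps, sortKey k.1 k.2 = key) ∧ ¬(∃ t ∈ temp, sortKey t.1 t.2 = key) then 1 else 0 := by
  induction ps with
  | nil => intro temp key; simp [dedup]
  | cons k ps ih =>
    intro temp key
    by_cases hm : k ∈ temp ∨ (k.2, k.1) ∈ temp
    · rw [show dedup temp (k :: ps) = dedup temp ps from by simp [dedup, hm], ih]
      by_cases hk : sortKey k.1 k.2 = key
      · have : ∃ t ∈ temp, sortKey t.1 t.2 = key := by
          rcases hm with h | h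
          · exact ⟨k, h, hk⟩
          · exact ⟨(k.2, k.1), h, by rw [← hk]; exact (key_eq_iff k (k.2, k.1)).mpr (Or.inr rfl)⟩
        simp [this]
      · have : (∃ t ∈ k :: ps, sortKey t.1 t.2 = key) ↔ (∃ t ∈ ps, sortKey t.1 t.2 = key) := by
          simp only [List.mem_cons]
          constructor
          · rintro ⟨t, ht | ht, h⟩
            · exact absurd (ht ▸ h) hk
            · exact ⟨t, ht, h⟩
          · rintro ⟨t, ht, h⟩; exact ⟨t, Or.inr ht, h⟩
        simp only [this]
    · rw [show dedup temp (k :: ps) = k :: dedup (temp ++ [k]) ps from by simp [dedup, hm]]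
      rw [List.countP_cons, ih]
      by_cases hk : sortKey k.1 k.2 = key
      · have hnew : ∃ t ∈ temp ++ [k], sortKey t.1 t.2 = key := ⟨k, by simp, hk⟩
        have hold : ¬ ∃ t ∈ temp, sortKey t.1 t.2 = key := by
          rintro ⟨t, ht, h⟩
          rcases (key_eq_iff k t).mp (h.trans hk.symm) with h' | h'
          · exact hm (Or.inl (h' ▸ ht))
          · exact hm (Or.inr (by
              have : t = (k.2, k.1) := h'
              rw [show (k.2, k.1) = t from this.symm]; exact ht))
        have hR : ∃ t ∈ k :: ps, sortKey t.1 t.2 = key := ⟨k, by simp, hk⟩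
        simp [hold, hk]
        intro x y _ _
        exact ⟨k.1, k.2, Or.inr (by simp), hk⟩
      · have : (∃ t ∈ temp ++ [k], sortKey t.1 t.2 = key) ↔ (∃ t ∈ temp, sortKey t.1 t.2 = key) := by
          simp only [List.mem_append, List.mem_singleton]
          constructor
          · rintro ⟨t, ht | rfl, h⟩
            · exact ⟨t, ht, h⟩
            · exact absurd h hk
          · rintro ⟨t, ht, h⟩; exact ⟨t, Or.inl ht, h⟩
        have hhd : (∃ t ∈ k :: ps, sortKey t.1 t.2 = key) ↔ (∃ t ∈ ps, sortKey t.1 t.2 = key) := by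
          simp only [List.mem_cons]
          constructor
          · rintro ⟨t, rfl | ht, h⟩
            · exact absurd h hk
            · exact ⟨t, ht, h⟩
          · rintro ⟨t, ht, h⟩; exact ⟨t, Or.inr ht, h⟩
        simp only [this, hhd]
        have hpk : (decide (sortKey k.1 k.2 = key)) = false := by simp [hk]
        rw [hpk]
        simp

-- B's step functions, named for the proofs (definitionally the lambdas in the port)
def bInner (st2 : PySem.Set (Int × Int) × List (Int × Int) × PySem.Dict (Int × Int) Int)
    (k : Int × Int) : PySem.Set (Int × Int) × List (Int × Int) × PySem.Dict (Int × Int) Int :=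
  let key := sortKey k.1 k.2
  if st2.1.contains key then st2
  else (st2.1.add key, st2.2.1 ++ [k],
        if k.1 ≠ k.2 then st2.2.2.insert key (st2.2.2.getD key 0 + 1) else st2.2.2)

def bOuter (st : List (Int × Int) × PySem.Dict (Int × Int) Int) (face : List Int) :
    List (Int × Int) × PySem.Dict (Int × Int) Int :=
  ((combos2 face).foldl bInner (PySem.Set.empty, st.1, st.2)).2

theorem alt_eq (faces : List (List Int)) :
    getBorderEdges_alt faces
    = (faces.foldl bOuter ([], PySem.Dict.empty)).1.filter
        (fun e => e.1 != e.2 && ((faces.foldl bOuter ([], PySem.Dict.empty)).2.getD (sortKey e.1 e.2) 0 == 1)) := rfl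

-- B's inner (per-face) loop
theorem inner_spec (ps : List (Int × Int)) :
    ∀ (temp : List (Int × Int)) (seen : PySem.Set (Int × Int)) (edges : List (Int × Int))
      (cnt : PySem.Dict (Int × Int) Int),
    (∀ t : Int × Int, sortKey t.1 t.2 ∈ seen ↔ (t ∈ temp ∨ (t.2, t.1) ∈ temp)) →
    (ps.foldl bInner (seen, edges, cnt)).2.1 = edges ++ dedup temp ps
    ∧ ∀ key, (ps.foldl bInner (seen, edges, cnt)).2.2.getD key 0
        = cnt.getD key 0 + ((dedup temp ps).countP (pk key) : Int) := by
  induction ps with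
  | nil => intro temp seen edges cnt hseen; simp [dedup]
  | cons k ps ih =>
    intro temp seen edges cnt hseen
    simp only [List.foldl_cons]
    by_cases hm : k ∈ temp ∨ (k.2, k.1) ∈ temp
    · have hc : seen.contains (sortKey k.1 k.2) = true :=
        (PySem.Set.contains_iff _ _).mpr ((hseen k).mpr hm)
      rw [show dedup temp (k :: ps) = dedup temp ps from by simp [dedup, hm]]
      rw [show bInner (seen, edges, cnt) k = (seen, edges, cnt) from by
        simp only [bInner, hc, if_true]]
      exact ih temp seen edges cnt hseen
    · have hc : seen.contains (sortKey k.1 k.2) = false := by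
        rw [Bool.eq_false_iff]
        intro h
        exact hm ((hseen k).mp ((PySem.Set.contains_iff _ _).mp h))
      rw [show dedup temp (k :: ps) = k :: dedup (temp ++ [k]) ps from by simp [dedup, hm]]
      rw [show bInner (seen, edges, cnt) k
          = (seen.add (sortKey k.1 k.2), edges ++ [k],
             if k.1 ≠ k.2 then cnt.insert (sortKey k.1 k.2) (cnt.getD (sortKey k.1 k.2) 0 + 1) else cnt) from by
        simp only [bInner, hc]; rfl]
      have hseen' : ∀ t : Int × Int,
          sortKey t.1 t.2 ∈ seen.add (sortKey k.1 k.2) ↔ (t ∈ temp ++ [k] ∨ (t.2, t.1) ∈ temp ++ [k]) := by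
        intro t
        rw [PySem.Set.mem_add]
        simp only [List.mem_append, List.mem_singleton]
        rw [hseen t, key_eq_iff k t]
        constructor
        · rintro ((h | h) | (h | h))
          · exact Or.inl (Or.inl h)
          · exact Or.inr (Or.inl h)
          · exact Or.inl (Or.inr h)
          · refine Or.inr (Or.inr ?_)
            obtain ⟨a, b⟩ := t; obtain ⟨c, d⟩ := k
            simp only [Prod.mk.injEq] at h ⊢
            exact ⟨h.2, h.1⟩
        · rintro ((h | h) | (h | h))
          · exact Or.inl (Or.inl h)
          · exact Or.inr (Or.inl h)
          · exact Or.inl (Or.inr h)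
          · refine Or.inr (Or.inr ?_)
            obtain ⟨a, b⟩ := t; obtain ⟨c, d⟩ := k
            simp only [Prod.mk.injEq] at h ⊢
            exact ⟨h.2, h.1⟩
      obtain ⟨hE, hC⟩ := ih (temp ++ [k]) (seen.add (sortKey k.1 k.2)) (edges ++ [k])
        (if k.1 ≠ k.2 then cnt.insert (sortKey k.1 k.2) (cnt.getD (sortKey k.1 k.2) 0 + 1) else cnt)
        hseen'
      refine ⟨by rw [hE, List.append_assoc, List.singleton_append], ?_⟩
      intro key
      rw [hC key, List.countP_cons]
      by_cases hne : k.1 ≠ k.2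
      · rw [if_pos hne]
        by_cases hkey : key = sortKey k.1 k.2
        · subst hkey
          rw [PySem.Dict.getD_insert]
          have hpk : pk (sortKey k.1 k.2) k = true := by simp [pk, hne]
          rw [hpk]
          simp
          omega
        · rw [PySem.Dict.getD_insert, if_neg hkey]
          have hpk : pk key k = false := by
            simp only [pk, decide_eq_false_iff_not, not_and]
            intro _ h; exact hkey h.symm
          rw [hpk]
          simp
      · rw [if_neg hne]
        have hpk : pk key k = false := by
          simp only [pk, decide_eq_false_iff_not, not_and]
          intro h; exact absurd h hne
        rw [hpk]
        simp

-- B's outer loop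
theorem outer_spec (faces : List (List Int)) :
    ∀ (edges : List (Int × Int)) (cnt : PySem.Dict (Int × Int) Int),
    (faces.foldl bOuter (edges, cnt)).1 = edges ++ edgesOf faces
    ∧ ∀ key, (faces.foldl bOuter (edges, cnt)).2.getD key 0
        = cnt.getD key 0 + ((faces.map (fun f => ((dedup [] (combos2 f)).countP (pk key) : Int))).sum) := by
  induction faces with
  | nil => intro edges cnt; simp [edgesOf]
  | cons f fs ih =>
    intro edges cnt
    simp only [List.foldl_cons]
    have hseen0 : ∀ t : Int × Int,
        sortKey t.1 t.2 ∈ (PySem.Set.empty : PySem.Set (Int × Int))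
          ↔ (t ∈ ([] : List (Int × Int)) ∨ (t.2, t.1) ∈ ([] : List (Int × Int))) := by
      intro t; simp [PySem.Set.empty]
    obtain ⟨hE, hC⟩ := inner_spec (combos2 f) [] PySem.Set.empty edges cnt hseen0
    rcases hres : (combos2 f).foldl bInner (PySem.Set.empty, edges, cnt) with ⟨rs, re, rc⟩
    rw [hres] at hE hC
    simp only at hE hC
    rw [show bOuter (edges, cnt) f = (re, rc) from by simp only [bOuter, hres]]
    subst hE
    obtain ⟨ihE, ihC⟩ := ih (edges ++ dedup [] (combos2 f)) rc
    constructor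
    · rw [ihE]; simp [edgesOf]
    · intro key
      rw [ihC key, hC key]
      simp only [List.map_cons, List.sum_cons]
      ring

-- generic counting foldl over a decidable proposition
theorem foldl_if_count {α : Type} (p : α → Prop) [DecidablePred p] (l : List α) :
    ∀ a : Int, l.foldl (fun c x => if p x then c + 1 else c) a = a + (l.countP (fun x => decide (p x)) : Int) := by
  induction l with
  | nil => intro a; simp
  | cons x xs ih =>
    intro a
    simp only [List.foldl_cons, List.countP_cons]
    by_cases h : p x
    · rw [if_pos h, ih]; simp [h]; ring
    · rw [if_neg h, ih]; simp [h]

-- generic filtering foldl over a decidable proposition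
theorem foldl_if_filter {α : Type} (p : α → Prop) [DecidablePred p] (l : List α) :
    ∀ acc : List α, l.foldl (fun a x => if p x then a ++ [x] else a) acc = acc ++ l.filter (fun x => decide (p x)) := by
  induction l with
  | nil => intro acc; simp
  | cons x xs ih =>
    intro acc
    simp only [List.foldl_cons, List.filter_cons]
    by_cases h : p x
    · rw [if_pos h, ih]; simp [h]
    · rw [if_neg h, ih]; simp [h]

-- the intersection test in A: |set(e) ∩ set(f)| = 2 iff e has two distinct endpoints both in f
theorem inter_len_eq_two (e : Int × Int) (f : List Int) :
    PySem.Set.len (PySem.Set.inter (PySem.Set.ofList [e.1, e.2]) (PySem.Set.ofList f)) = 2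
    ↔ e.1 ≠ e.2 ∧ e.1 ∈ f ∧ e.2 ∈ f := by
  by_cases heq : e.1 = e.2
  · have : PySem.Set.ofList [e.1, e.2] = [e.1] := by
      simp [PySem.Set.ofList, PySem.Set.add, PySem.Set.empty, PySem.Set.contains, heq]
    rw [this]
    simp only [PySem.Set.len, PySem.Set.inter]
    constructor
    · intro h
      exfalso
      have h2 := List.length_filter_le (fun x => (PySem.Set.ofList f).contains x) [e.1]
      simp only [List.length_cons, List.length_nil] at h2
      omega
    · rintro ⟨h, _⟩; exact absurd heq h
  · have hne' : ¬ e.2 = e.1 := fun h => heq h.symm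
    have : PySem.Set.ofList [e.1, e.2] = [e.1, e.2] := by
      simp [PySem.Set.ofList, PySem.Set.add, PySem.Set.empty, PySem.Set.contains,
        List.contains_eq_mem, hne']
    rw [this]
    simp only [PySem.Set.len, PySem.Set.inter, List.filter]
    have hmem : ∀ x : Int, ((PySem.Set.ofList f).contains x = true) ↔ x ∈ f := by
      intro x
      rw [PySem.Set.contains_iff, PySem.Set.mem_ofList]
    by_cases h1 : e.1 ∈ f <;> by_cases h2 : e.2 ∈ f <;>
      simp [h1, h2, heq]

-- count of increments a single face contributes to a (strictly sorted) key
theorem face_count (f : List Int) (key : Int × Int) (hlt : key.1 < key.2) :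
    (dedup [] (combos2 f)).countP (pk key)
    = if key.1 ∈ f ∧ key.2 ∈ f then 1 else 0 := by
  have hcongr : (dedup [] (combos2 f)).countP (pk key)
      = (dedup [] (combos2 f)).countP (fun k => decide (sortKey k.1 k.2 = key)) := by
    apply List.countP_congr
    intro k _
    have hiff : (k.1 ≠ k.2 ∧ sortKey k.1 k.2 = key) ↔ (sortKey k.1 k.2 = key) := by
      constructor
      · exact fun h => h.2
      · intro h
        refine ⟨?_, h⟩
        intro hkk
        rw [hkk] at h
        simp only [sortKey, le_refl, if_true] at h
        rw [← h] at hlt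
        exact lt_irrefl _ hlt
    simp [pk, hiff]
  rw [hcongr, dedup_key_count]
  simp only [List.not_mem_nil, false_and, exists_false, not_false_iff, and_true]
  simp only [combos2_exists hlt]

-- sum of per-face indicators = countP
theorem sum_indicator (faces : List (List Int)) (key : Int × Int) (hlt : key.1 < key.2) :
    ((faces.map (fun f => ((dedup [] (combos2 f)).countP (pk key) : Int))).sum)
    = (faces.countP (fun f => decide (key.1 ∈ f ∧ key.2 ∈ f)) : Int) := by
  induction faces with
  | nil => simp
  | cons f fs ih =>
    simp only [List.map_cons, List.sum_cons, List.countP_cons, ih]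
    rw [face_count f key hlt]
    by_cases h : key.1 ∈ f ∧ key.2 ∈ f
    · simp [h]; ring
    · simp [h]

-- A's count for an edge
theorem countA_eq (faces : List (List Int)) (e : Int × Int) :
    faces.foldl (fun count item2 =>
      if PySem.Set.len (PySem.Set.inter (PySem.Set.ofList [e.1, e.2]) (PySem.Set.ofList item2)) = 2
      then count + 1 else count) (0 : Int)
    = (faces.countP (fun f => decide (e.1 ≠ e.2 ∧ e.1 ∈ f ∧ e.2 ∈ f)) : Int) := by
  rw [foldl_if_count]
  simp only [Int.zero_add]
  congr 1
  apply List.countP_congr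
  intro f _
  simpa using inter_len_eq_two e f

-- ===== VERDICT (by name: the statement is the Claim_ definition above) =====
theorem getBorderEdges_spec : Claim_equal_getBorderEdges := by
  intro faces _
  unfold Spec_getBorderEdges
  rw [alt_eq]
  unfold getBorderEdges
  rw [edgesA faces []]
  obtain ⟨hE, hC⟩ := outer_spec faces [] PySem.Dict.empty
  rw [hE]
  simp only [List.nil_append]
  rw [show (fun (borders : List (Int × Int)) (item : Int × Int) =>
      let count : Int := faces.foldl (fun count item2 =>
        if PySem.Set.len (PySem.Set.inter (PySem.Set.ofList [item.1, item.2]) (PySem.Set.ofList item2)) = 2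
        then count + 1 else count) 0
      if count = 1 then borders ++ [item] else borders)
    = (fun borders item => if (faces.foldl (fun count item2 =>
        if PySem.Set.len (PySem.Set.inter (PySem.Set.ofList [item.1, item.2]) (PySem.Set.ofList item2)) = 2
        then count + 1 else count) (0:Int)) = 1 then borders ++ [item] else borders) from rfl]
  rw [foldl_if_filter (fun item => (faces.foldl (fun count item2 =>
        if PySem.Set.len (PySem.Set.inter (PySem.Set.ofList [item.1, item.2]) (PySem.Set.ofList item2)) = 2
        then count + 1 else count) (0:Int)) = 1) (edgesOf faces) []]
  simp only [List.nil_append]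
  apply List.filter_congr
  intro e _
  rw [show (faces.foldl (fun count item2 =>
        if PySem.Set.len (PySem.Set.inter (PySem.Set.ofList [e.1, e.2]) (PySem.Set.ofList item2)) = 2
        then count + 1 else count) (0:Int)) = (faces.countP (fun f => decide (e.1 ≠ e.2 ∧ e.1 ∈ f ∧ e.2 ∈ f)) : Int) from countA_eq faces e]
  by_cases hne : e.1 = e.2
  · have hz : (faces.countP (fun f => decide (e.1 ≠ e.2 ∧ e.1 ∈ f ∧ e.2 ∈ f))) = 0 := by
      apply List.countP_eq_zero.mpr
      intro f _
      simp [hne]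
    rw [hz]
    simp [hne]
  · have hlt : (sortKey e.1 e.2).1 < (sortKey e.1 e.2).2 := by
      simp only [sortKey]
      split_ifs with h <;> simp <;> omega
    rw [hC (sortKey e.1 e.2), sum_indicator faces _ hlt]
    have hmemiff : (faces.countP (fun f => decide ((sortKey e.1 e.2).1 ∈ f ∧ (sortKey e.1 e.2).2 ∈ f)))
        = (faces.countP (fun f => decide (e.1 ≠ e.2 ∧ e.1 ∈ f ∧ e.2 ∈ f))) := by
      apply List.countP_congr
      intro f _
      have hiff2 : ((sortKey e.1 e.2).1 ∈ f ∧ (sortKey e.1 e.2).2 ∈ f) ↔ (e.1 ≠ e.2 ∧ e.1 ∈ f ∧ e.2 ∈ f) := by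
        unfold sortKey
        split_ifs <;> simp only [] <;> constructor <;> intro h <;>
          first
          | exact ⟨hne, h.1, h.2⟩
          | exact ⟨hne, h.2, h.1⟩
          | exact ⟨h.2.1, h.2.2⟩
          | exact ⟨h.2.2, h.2.1⟩
      simpa using hiff2
    rw [hmemiff]
    rw [PySem.Dict.getD_empty, Int.zero_add]
    have hbne : (e.1 != e.2) = true := by simp [bne, hne]
    rw [hbne, Bool.true_and]
    have hbeq : ∀ x y : Int, (x == y) = decide (x = y) := by
      intro x y; by_cases h : x = y <;> simp [h]
    rw [hbeq]
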